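-- pv_equiv track=rewrite | github.com/Project-N-E-K-O/N.E.K.O | utils/autostart_service.py | _quote_desktop_entry_exec_argument
-- ===== SOURCE A (Python) =====
-- def _quote_desktop_entry_exec_argument(value: str) -> str:
--     escaped: list[str] = []
--
--     for char in value:
--         if char == "\\":
--             escaped.append("\\\\\\\\")
--         elif char in {'"', "`", "$"}:
--             escaped.append("\\" + char)
--         else:
--             escaped.append(char)
--
--     return '"' + "".join(escaped) + '"'
-- ===== SOURCE B (Python) =====
-- def _quote_desktop_entry_exec_argument(value: str) -> str:
--     # Staged whole-string passes: each special character is rewritten by its own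
--     # replace() sweep (backslashes first, so later sweeps never touch the
--     # backslashes a sweep inserts), instead of one per-character loop.
--     escaped = value.replace("\\", "\\\\\\\\")
--     escaped = escaped.replace('"', '\\"')
--     escaped = escaped.replace("`", "\\`")
--     escaped = escaped.replace("$", "\\$")
--     return '"' + escaped + '"'
-- ===== Notes on version B (the rewrite author's own statement) =====
-- stated objective: alternative
-- what changed: Replaced the single per-character loop with explicit branches by four staged whole-string replace() sweeps (backslash first so later sweeps never touch inserted backslashes), then quote-wrapping.
import Mathlib
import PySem

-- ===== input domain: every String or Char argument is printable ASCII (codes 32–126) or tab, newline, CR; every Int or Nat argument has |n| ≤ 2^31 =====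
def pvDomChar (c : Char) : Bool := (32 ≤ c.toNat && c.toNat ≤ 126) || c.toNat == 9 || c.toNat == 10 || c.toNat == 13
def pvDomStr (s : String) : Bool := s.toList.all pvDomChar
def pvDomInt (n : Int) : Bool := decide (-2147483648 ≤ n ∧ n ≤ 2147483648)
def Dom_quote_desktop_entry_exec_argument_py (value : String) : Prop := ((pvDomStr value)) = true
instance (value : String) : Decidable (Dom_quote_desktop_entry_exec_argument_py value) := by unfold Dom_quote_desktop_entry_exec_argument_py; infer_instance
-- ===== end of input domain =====

-- B replaces A's single per-character loop by four staged whole-string replace()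
-- sweeps (backslash first, then ", `, $); same output, same linear cost.

-- ===== PORT A =====
-- the loop body: each char contributes one appended string (as List Char)
def quote_desktop_entry_exec_argument_py (value : String) : String :=
  let escaped : List (List Char) :=
    value.toList.foldl (fun acc char =>
      if char = '\\' then acc ++ [['\\', '\\', '\\', '\\']]
      else if char = '"' ∨ char = '`' ∨ char = '$' then acc ++ [['\\', char]]
      else acc ++ [[char]]) []
  String.mk ('"' :: PySem.Chars.join [] escaped ++ ['"'])

-- ===== PORT B =====
-- four staged replace() sweeps, then '"' + escaped + '"' (built over List Char)
def quote_desktop_entry_exec_argument_py_alt (value : String) : String :=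
  let escaped := PySem.Str.replace value "\\" "\\\\\\\\"
  let escaped := PySem.Str.replace escaped "\"" "\\\""
  let escaped := PySem.Str.replace escaped "`" "\\`"
  let escaped := PySem.Str.replace escaped "$" "\\$"
  String.mk ('"' :: escaped.toList ++ ['"'])

-- ===== PRECONDITION & SPEC =====
def Spec_quote_desktop_entry_exec_argument_py (value : String) (out : String) : Prop := out = quote_desktop_entry_exec_argument_py_alt value
instance (value : String) (out : String) : Decidable (Spec_quote_desktop_entry_exec_argument_py value out) := by unfold Spec_quote_desktop_entry_exec_argument_py; infer_instance

-- ===== CLAIM (what is proved, stated in full; the proofs are below) =====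
def Claim_equal_quote_desktop_entry_exec_argument_py : Prop := ∀ (value : String), Dom_quote_desktop_entry_exec_argument_py value → Spec_quote_desktop_entry_exec_argument_py value (quote_desktop_entry_exec_argument_py value)

-- ===== LEMMAS AND PROOFS =====

-- per-char escape as A computes it
def pvEscA (char : Char) : List Char :=
  if char = '\\' then ['\\', '\\', '\\', '\\']
  else if char = '"' ∨ char = '`' ∨ char = '$' then ['\\', char]
  else [char]

-- one replace sweep with a single-char pattern, seen per character
def pvCharMap (p : Char) (r : List Char) (c : Char) : List Char :=
  if c = p then r else [c]

theorem pvFoldA (l : List Char) (acc : List (List Char)) :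
    l.foldl (fun acc char =>
      if char = '\\' then acc ++ [['\\', '\\', '\\', '\\']]
      else if char = '"' ∨ char = '`' ∨ char = '$' then acc ++ [['\\', char]]
      else acc ++ [[char]]) acc = acc ++ l.map pvEscA := by
  induction l generalizing acc with
  | nil => simp
  | cons c rest ih =>
    simp only [List.foldl_cons, List.map_cons, ih, pvEscA]
    split_ifs <;> simp

theorem pvJoinNil (l : List (List Char)) :
    PySem.Chars.join [] l = l.flatten := by
  induction l with
  | nil => simp [PySem.Chars.join, List.intercalate]
  | cons a rest ih =>
    cases rest with
    | nil => simp [PySem.Chars.join, List.intercalate]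
    | cons b r => simpa [PySem.Chars.join_cons_cons] using ih

-- a replace() with a one-character pattern is a per-character flatMap
theorem pvGoSingle (p : Char) (r : List Char) (l : List Char) (fuel : Nat)
    (acc : List Char) (h : l.length ≤ fuel) :
    PySem.Chars.replace.go [p] r fuel l acc
      = acc.reverse ++ l.flatMap (pvCharMap p r) := by
  induction l generalizing fuel acc with
  | nil => cases fuel <;> simp [PySem.Chars.replace.go]
  | cons c t ih =>
    cases fuel with
    | zero => simp at h
    | succ f =>
      rw [PySem.Chars.replace.go]
      by_cases hc : c = p
      · subst hc
        have hpre : [c].isPrefixOf (c :: t) = true := by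
          simp [List.isPrefixOf]
        have ht : t.length ≤ f := by simp at h; omega
        have hd : List.drop [c].length (c :: t) = t := rfl
        simp only [hpre, if_true, hd]
        rw [ih f (r.reverse ++ acc) ht]
        simp [pvCharMap]
      · have hpre : [p].isPrefixOf (c :: t) = false := by
          simp [List.isPrefixOf]
          exact fun h' => hc h'.symm
        simp only [hpre, Bool.false_eq_true, if_false]
        have ht : t.length ≤ f := by simp at h; omega
        rw [ih f (c :: acc) ht]
        simp only [List.flatMap_cons, pvCharMap, if_neg hc]
        simp

theorem pvReplaceSingle (l : List Char) (p : Char) (r : List Char) :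
    PySem.Chars.replace l [p] r = l.flatMap (pvCharMap p r) := by
  simp [PySem.Chars.replace, pvGoSingle p r l l.length [] (le_refl _)]

-- the four staged sweeps agree with A's per-char escape
theorem pvSweepsAgree (c : Char) :
    ((((pvCharMap '\\' ['\\', '\\', '\\', '\\'] c).flatMap
        (pvCharMap '"' ['\\', '"'])).flatMap
        (pvCharMap '`' ['\\', '`'])).flatMap
        (pvCharMap '$' ['\\', '$'])) = pvEscA c := by
  by_cases h1 : c = '\\'
  · subst h1; decide
  by_cases h2 : c = '"'
  · subst h2; decide
  by_cases h3 : c = '`'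
  · subst h3; decide
  by_cases h4 : c = '$'
  · subst h4; decide
  · simp [pvCharMap, pvEscA, h1, h2, h3, h4]

-- the whole chained sweep agrees with A's per-char flatMap
theorem pvChainAgree (l : List Char) :
    ((((l.flatMap (pvCharMap '\\' ['\\', '\\', '\\', '\\'])).flatMap
        (pvCharMap '"' ['\\', '"'])).flatMap
        (pvCharMap '`' ['\\', '`'])).flatMap
        (pvCharMap '$' ['\\', '$'])) = l.flatMap pvEscA := by
  induction l with
  | nil => simp
  | cons c t ih =>
    simp only [List.flatMap_cons, List.flatMap_append, ih, pvSweepsAgree]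

-- ===== VERDICT (by name: the statement is the Claim_ definition above) =====
theorem quote_desktop_entry_exec_argument_py_spec : Claim_equal_quote_desktop_entry_exec_argument_py := by
  intro value _
  unfold Spec_quote_desktop_entry_exec_argument_py
  unfold quote_desktop_entry_exec_argument_py quote_desktop_entry_exec_argument_py_alt
  simp only [pvFoldA, List.nil_append, pvJoinNil, List.flatten_eq_flatMap,
    List.flatMap_map, id_eq, PySem.Str.toList_replace]
  have hlit : ("\\".toList = ['\\'] ∧ "\"".toList = ['"'] ∧ "`".toList = ['`']
      ∧ "$".toList = ['$'] ∧ "\\\\\\\\".toList = ['\\', '\\', '\\', '\\']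
      ∧ "\\\"".toList = ['\\', '"'] ∧ "\\`".toList = ['\\', '`']
      ∧ "\\$".toList = ['\\', '$']) := by decide
  obtain ⟨e1, e2, e3, e4, e5, e6, e7, e8⟩ := hlit
  rw [e1, e2, e3, e4, e5, e6, e7, e8,
    pvReplaceSingle, pvReplaceSingle, pvReplaceSingle, pvReplaceSingle,
    pvChainAgree]
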